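-- pv_equiv track=rewrite | github.com/iamheavymetalx7/LeetCode-Submissions | 1208-get-equal-substrings-within-budget/1208-get-equal-substrings-within-budget.py | equalSubstring
-- ===== SOURCE A (Python) =====
-- def equalSubstring(s: str, t: str, maxCost: int) -> int:
--
--     l=0
--     ans=0
--     n=len(s)
--
--     for r in range(n):
--         maxCost-=abs(ord(s[r])-ord(t[r]))
--
--         while maxCost<0:
--             maxCost+=abs(ord(s[l])-ord(t[l]))
--             l+=1
--         ans=max(ans,r-l+1)
--     return ans
-- ===== SOURCE B (Python) =====
-- def equalSubstring(s: str, t: str, maxCost: int) -> int: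
--     # Prefix-cost table + binary search for the leftmost admissible window start.
--     n = len(s)
--     pre = [0]
--     c = 0
--     for i in range(n):
--         c += abs(ord(s[i]) - ord(t[i]))
--         pre.append(c)
--     ans = 0
--     for r in range(n):
--         target = pre[r + 1] - maxCost
--         # hand-written bisect_left(pre, target)
--         lo, hi = 0, n + 1
--         while lo < hi:
--             mid = (lo + hi) // 2
--             if pre[mid] < target:
--                 lo = mid + 1
--             else:
--                 hi = mid
--         ans = max(ans, r + 1 - lo)
--     return ans
-- ===== Notes on version B (the rewrite author's own statement) =====
-- stated objective: alternative
-- what changed: Replaces the amortized two-pointer sliding window with a precomputed prefix-cost table plus a hand-written binary search (bisect_left) that finds, for each right end, the leftmost window start whose cost fits the budget.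
import Mathlib
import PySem

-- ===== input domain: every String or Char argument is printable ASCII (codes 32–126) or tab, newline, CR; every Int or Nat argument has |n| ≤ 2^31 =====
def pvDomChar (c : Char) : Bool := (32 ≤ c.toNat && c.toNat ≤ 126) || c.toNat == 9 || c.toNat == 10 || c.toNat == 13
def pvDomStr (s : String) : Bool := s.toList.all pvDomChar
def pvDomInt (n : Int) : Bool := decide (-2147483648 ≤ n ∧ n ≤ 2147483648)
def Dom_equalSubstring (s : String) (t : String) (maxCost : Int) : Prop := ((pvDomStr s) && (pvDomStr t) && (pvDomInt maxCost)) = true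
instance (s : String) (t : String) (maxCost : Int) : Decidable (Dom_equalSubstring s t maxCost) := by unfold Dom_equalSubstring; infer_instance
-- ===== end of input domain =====

-- B replaces A's sliding window by a prefix-cost table + binary search (alternative algorithm,
-- same return values); equivalence of the RETURN value is what is proved below.

-- ===== PORT A =====
-- ord(c)
def pvOrd (c : Char) : Int := (c.toNat : Int)
-- abs(ord(s[i]) - ord(t[i])); the index is in range whenever the Pythons read it inside Pre_
def pvCost (sl tl : List Char) (i : Nat) : Int := |pvOrd (sl.getD i ' ') - pvOrd (tl.getD i ' ')|
-- the inner `while maxCost<0` loop; fuel n+1 is enough inside Pre_ (l stops at ≤ r+1)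
def eqsWhile (g : Nat → Int) : Nat → Nat → Int → Nat × Int
  | 0, l, mc => (l, mc)
  | fuel+1, l, mc => if mc < 0 then eqsWhile g fuel (l+1) (mc + g l) else (l, mc)

def equalSubstring (s : String) (t : String) (maxCost : Int) : Int :=
  let sl := s.toList
  let tl := t.toList
  let n := sl.length
  ((List.range n).foldl
    (fun (st : Nat × Int × Int) (r : Nat) =>
      let mc1 := st.2.2 - pvCost sl tl r
      let lm := eqsWhile (pvCost sl tl) (n+1) st.1 mc1
      (lm.1, max st.2.1 ((r : Int) - (lm.1 : Int) + 1), lm.2))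
    (0, 0, maxCost)).2.1

-- ===== PORT B =====
-- the hand-written `while lo < hi` bisect_left loop; fuel hi-lo (= n+1 at the call) is enough
def pvBisect (pre : List Int) (x : Int) : Nat → Nat → Nat → Nat
  | 0, lo, _ => lo
  | fuel+1, lo, hi =>
    if lo < hi then
      if pre.getD ((lo + hi) / 2) 0 < x then pvBisect pre x fuel ((lo + hi) / 2 + 1) hi
      else pvBisect pre x fuel lo ((lo + hi) / 2)
    else lo

def equalSubstring_alt (s : String) (t : String) (maxCost : Int) : Int :=
  let sl := s.toList
  let tl := t.toList
  let n := sl.length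
  let pre := ((List.range n).foldl
      (fun (ac : List Int × Int) (i : Nat) =>
        let c := ac.2 + pvCost sl tl i
        (ac.1 ++ [c], c)) ([0], 0)).1
  (List.range n).foldl
    (fun (ans : Int) (r : Nat) =>
      let target := pre.getD (r+1) 0 - maxCost
      let lo := pvBisect pre target (n+1) 0 (n+1)
      max ans ((r : Int) + 1 - (lo : Int))) 0

-- ===== PRECONDITION & SPEC =====
-- Pre_ excludes exactly the inputs where A raises IndexError: len(t) < len(s) (t[r] out of
-- range), and maxCost < 0 with s non-empty (the left pointer runs past the string's end).
def Pre_equalSubstring (s : String) (t : String) (maxCost : Int) : Prop :=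
  s.toList.length ≤ t.toList.length ∧ (0 ≤ maxCost ∨ s.toList.length = 0)
instance (s : String) (t : String) (maxCost : Int) : Decidable (Pre_equalSubstring s t maxCost) := by
  unfold Pre_equalSubstring; infer_instance

def pvWitness_equalSubstring : String × String × Int := ("abcd", "bcdf", 3)

def Spec_equalSubstring (s : String) (t : String) (maxCost : Int) (out : Int) : Prop := out = equalSubstring_alt s t maxCost
instance (s : String) (t : String) (maxCost : Int) (out : Int) : Decidable (Spec_equalSubstring s t maxCost out) := by unfold Spec_equalSubstring; infer_instance

-- ===== CLAIM (what is proved, stated in full; the proofs are below) =====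
def Claim_equal_equalSubstring : Prop := ∀ (s : String) (t : String) (maxCost : Int), Dom_equalSubstring s t maxCost → Pre_equalSubstring s t maxCost → Spec_equalSubstring s t maxCost (equalSubstring s t maxCost)

-- ===== LEMMAS AND PROOFS =====

-- prefix cost: S g k = sum of the first k per-index costs
def pvS (g : Nat → Int) (k : Nat) : Int := ((List.range k).map g).sum

theorem pvS_succ (g : Nat → Int) (k : Nat) : pvS g (k+1) = pvS g k + g k := by
  simp [pvS, List.range_succ]

theorem pvS_mono (g : Nat → Int) (hg : ∀ i, 0 ≤ g i) {j k : Nat} (h : j ≤ k) :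
    pvS g j ≤ pvS g k := by
  induction k with
  | zero => simp_all
  | succ k ih =>
    rcases Nat.lt_or_ge j (k+1) with h' | h'
    · have := ih (by omega)
      have := hg k
      rw [pvS_succ]; omega
    · have : j = k+1 := by omega
      simp [this]

-- the minimal window start for right prefix K: least l with pvS g K - pvS g l ≤ c
def pvM (g : Nat → Int) (c : Int) (hc : 0 ≤ c) (K : Nat) : Nat :=
  Nat.find (p := fun l => pvS g K - pvS g l ≤ c) ⟨K, by omega⟩

theorem pvM_spec (g : Nat → Int) (c : Int) (hc : 0 ≤ c) (K : Nat) :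
    pvS g K - pvS g (pvM g c hc K) ≤ c :=
  Nat.find_spec (p := fun l => pvS g K - pvS g l ≤ c) ⟨K, by omega⟩

theorem pvM_le (g : Nat → Int) (c : Int) (hc : 0 ≤ c) (K : Nat) : pvM g c hc K ≤ K :=
  Nat.find_min' _ (by omega)

theorem pvM_min (g : Nat → Int) (c : Int) (hc : 0 ≤ c) (K : Nat) {l : Nat}
    (h : l < pvM g c hc K) : c < pvS g K - pvS g l := by
  have := Nat.find_min (p := fun l => pvS g K - pvS g l ≤ c) ⟨K, by omega⟩ h
  omega

theorem pvM_mono (g : Nat → Int) (hg : ∀ i, 0 ≤ g i) (c : Int) (hc : 0 ≤ c) (K : Nat) :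
    pvM g c hc K ≤ pvM g c hc (K+1) := by
  apply Nat.find_min'
  have h1 := pvM_spec g c hc (K+1)
  have h2 : pvS g K ≤ pvS g (K+1) := pvS_mono g hg (by omega)
  omega

-- the while loop lands exactly on the minimal start pvM
theorem eqsWhile_eq (g : Nat → Int) (c : Int) (hc : 0 ≤ c) (K : Nat) :
    ∀ (fuel l : Nat), l ≤ pvM g c hc K → pvM g c hc K - l < fuel →
    eqsWhile g fuel l (c - (pvS g K - pvS g l)) =
      (pvM g c hc K, c - (pvS g K - pvS g (pvM g c hc K))) := by
  intro fuel
  induction fuel with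
  | zero => intro l _ h; omega
  | succ fuel ih =>
    intro l hl hf
    by_cases hneg : c - (pvS g K - pvS g l) < 0
    · have hlt : l < pvM g c hc K := by
        rcases Nat.lt_or_ge l (pvM g c hc K) with h | h
        · exact h
        · have heq : l = pvM g c hc K := by omega
          have hspec := pvM_spec g c hc K
          rw [heq] at hneg; omega
      rw [eqsWhile, if_pos hneg]
      have harg : c - (pvS g K - pvS g l) + g l = c - (pvS g K - pvS g (l+1)) := by
        have := pvS_succ g l; omega
      rw [harg]
      exact ih (l+1) (by omega) (by omega)
    · have hge : pvM g c hc K ≤ l := Nat.find_min' _ (by omega)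
      have hle : l = pvM g c hc K := by omega
      rw [eqsWhile, if_neg hneg, hle]

-- the running answer both programs accumulate
def pvAns (g : Nat → Int) (c : Int) (hc : 0 ≤ c) (k : Nat) : Int :=
  (List.range k).foldl (fun (a : Int) (r : Nat) => max a ((r : Int) - ((pvM g c hc (r+1) : Nat) : Int) + 1)) 0

theorem pvM_zero (g : Nat → Int) (c : Int) (hc : 0 ≤ c) : pvM g c hc 0 = 0 := by
  have := pvM_le g c hc 0; omega

-- A's fold invariant
theorem foldA_inv (g : Nat → Int) (hg : ∀ i, 0 ≤ g i) (c : Int) (hc : 0 ≤ c) (N : Nat) :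
    ∀ (k : Nat), k ≤ N →
    (List.range k).foldl
      (fun (st : Nat × Int × Int) (r : Nat) =>
        let mc1 := st.2.2 - g r
        let lm := eqsWhile g (N+1) st.1 mc1
        (lm.1, max st.2.1 ((r : Int) - (lm.1 : Int) + 1), lm.2))
      (0, 0, c)
    = (pvM g c hc k, pvAns g c hc k, c - (pvS g k - pvS g (pvM g c hc k))) := by
  intro k
  induction k with
  | zero =>
    intro _
    simp [pvM_zero, pvAns, pvS]
  | succ k ih =>
    intro hk
    rw [List.range_succ, List.foldl_append, ih (by omega)]
    simp only [List.foldl_cons, List.foldl_nil]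
    have harg : c - (pvS g k - pvS g (pvM g c hc k)) - g k
        = c - (pvS g (k+1) - pvS g (pvM g c hc k)) := by
      have := pvS_succ g k; omega
    have hfuel : pvM g c hc (k+1) - pvM g c hc k < N + 1 := by
      have := pvM_le g c hc (k+1); omega
    have hW := eqsWhile_eq g c hc (k+1) (N+1) (pvM g c hc k)
      (pvM_mono g hg c hc k) hfuel
    simp only [harg, hW]
    have hans : pvAns g c hc (k+1)
        = max (pvAns g c hc k) ((k : Int) - (pvM g c hc (k+1) : Int) + 1) := by
      unfold pvAns
      rw [List.range_succ, List.foldl_append]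
      rfl
    rw [hans]

-- the prefix list B builds is the map of pvS over range (n+1)
theorem preList_eq (g : Nat → Int) (N : Nat) :
    (List.range N).foldl
      (fun (ac : List Int × Int) (i : Nat) => (ac.1 ++ [ac.2 + g i], ac.2 + g i)) ([0], 0)
    = ((List.range (N+1)).map (pvS g), pvS g N) := by
  induction N with
  | zero => simp [pvS]
  | succ N ih =>
    rw [List.range_succ, List.foldl_append, ih]
    simp only [List.foldl_cons, List.foldl_nil]
    rw [List.range_succ (n := N+1), List.map_append]
    simp [pvS_succ]

theorem getD_map_range (f : Nat → Int) (M j : Nat) (hj : j < M) :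
    ((List.range M).map f).getD j 0 = f j := by
  rw [List.getD_eq_getElem?_getD]
  simp [List.getElem?_map, List.getElem?_range hj]

-- the binary search over the monotone prefix list lands on pvM
theorem pvBisect_eq (g : Nat → Int) (hg : ∀ i, 0 ≤ g i) (c : Int) (hc : 0 ≤ c)
    (N K : Nat) (hK : K ≤ N) :
    ∀ (fuel lo hi : Nat), hi ≤ N + 1 → lo ≤ pvM g c hc K → pvM g c hc K ≤ hi →
      hi - lo ≤ fuel →
      (∀ j, j < lo → pvS g j < pvS g K - c) →
      (∀ j, hi ≤ j → j ≤ N → pvS g K - c ≤ pvS g j) →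
      pvBisect ((List.range (N+1)).map (pvS g)) (pvS g K - c) fuel lo hi = pvM g c hc K := by
  intro fuel
  induction fuel with
  | zero =>
    intro lo hi _ hlo hhi hf _ _
    have : lo = pvM g c hc K := by omega
    rw [pvBisect, this]
  | succ fuel ih =>
    intro lo hi hhiN hlo hhi hf hlow hhigh
    by_cases hlh : lo < hi
    · rw [pvBisect, if_pos hlh]
      have hmid : (lo + hi) / 2 < N + 1 := by omega
      rw [getD_map_range (pvS g) (N+1) ((lo+hi)/2) hmid]
      by_cases hcmp : pvS g ((lo + hi) / 2) < pvS g K - c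
      · rw [if_pos hcmp]
        have hmlo : pvM g c hc K ≥ (lo + hi) / 2 + 1 := by
          by_contra hcon
          have hmle : pvM g c hc K ≤ (lo + hi) / 2 := by omega
          have hms := pvM_spec g c hc K
          have := pvS_mono g hg hmle
          omega
        exact ih ((lo + hi) / 2 + 1) hi hhiN hmlo hhi (by omega)
          (fun j hj => lt_of_le_of_lt (pvS_mono g hg (by omega)) hcmp) hhigh
      · rw [if_neg hcmp]
        have hmhi : pvM g c hc K ≤ (lo + hi) / 2 := by
          by_contra hcon
          have : (lo + hi) / 2 < pvM g c hc K := by omega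
          have := pvM_min g c hc K this
          omega
        exact ih lo ((lo + hi) / 2) (by omega) hlo hmhi (by omega) hlow
          (fun j hj hjN => le_trans (by omega) (pvS_mono g hg hj))
    · rw [pvBisect, if_neg hlh]
      omega

theorem foldl_congr_mem' {α β : Type} (l : List β) (f g : α → β → α) (a : α)
    (h : ∀ acc b, b ∈ l → f acc b = g acc b) : l.foldl f a = l.foldl g a := by
  induction l generalizing a with
  | nil => rfl
  | cons x xs ih =>
    simp only [List.foldl_cons]
    rw [h a x (by simp)]
    exact ih _ (fun acc b hb => h acc b (by simp [hb]))

theorem pvCost_nonneg (sl tl : List Char) : ∀ i, 0 ≤ pvCost sl tl i := fun i => abs_nonneg _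

theorem equalSubstring_spec : Claim_equal_equalSubstring := by
  intro s t maxCost _ hpre
  unfold Spec_equalSubstring
  rcases hpre with ⟨_, hpre⟩
  rcases hpre with hc | hzero
  · -- 0 ≤ maxCost: both sides compute pvAns
    set sl := s.toList with hsl
    set tl := t.toList with htl
    set g := pvCost sl tl with hgdef
    have hg : ∀ i, 0 ≤ g i := pvCost_nonneg sl tl
    set n := sl.length with hn
    have hA : equalSubstring s t maxCost
        = ((List.range n).foldl
            (fun (st : Nat × Int × Int) (r : Nat) =>
              let mc1 := st.2.2 - g r
              let lm := eqsWhile g (n+1) st.1 mc1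
              (lm.1, max st.2.1 ((r : Int) - (lm.1 : Int) + 1), lm.2))
            (0, 0, maxCost)).2.1 := rfl
    rw [foldA_inv g hg maxCost hc n n le_rfl] at hA
    have hB : equalSubstring_alt s t maxCost
        = (List.range n).foldl
            (fun (ans : Int) (r : Nat) =>
              let target := (((List.range n).foldl
                  (fun (ac : List Int × Int) (i : Nat) => (ac.1 ++ [ac.2 + g i], ac.2 + g i))
                  ([0], 0)).1).getD (r+1) 0 - maxCost
              let lo := pvBisect (((List.range n).foldl
                  (fun (ac : List Int × Int) (i : Nat) => (ac.1 ++ [ac.2 + g i], ac.2 + g i))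
                  ([0], 0)).1) target (n+1) 0 (n+1)
              max ans ((r : Int) + 1 - (lo : Int))) 0 := rfl
    rw [preList_eq g n] at hB
    have hB2 : equalSubstring_alt s t maxCost
        = (List.range n).foldl
            (fun (a : Int) (r : Nat) => max a ((r : Int) - (pvM g maxCost hc (r+1) : Int) + 1)) 0 := by
      rw [hB]
      apply foldl_congr_mem'
      intro acc r hr
      have hrn : r < n := List.mem_range.mp hr
      have htar : (((List.range (n+1)).map (pvS g)).getD (r+1) 0 - maxCost)
          = pvS g (r+1) - maxCost := by
        rw [getD_map_range _ _ _ (by omega)]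
      simp only [htar]
      rw [pvBisect_eq g hg maxCost hc n (r+1) (by omega) (n+1) 0 (n+1) le_rfl (by omega)
        (le_trans (pvM_le g maxCost hc (r+1)) (by omega)) (by omega)
        (by omega) (by intro j h1 h2; omega)]
      have : (r : Int) + 1 - (pvM g maxCost hc (r+1) : Int)
          = (r : Int) - (pvM g maxCost hc (r+1) : Int) + 1 := by ring
      rw [this]
    rw [hA, hB2]
    rfl
  · -- s is empty: both sides are 0
    have h0 : s.toList = [] := List.eq_nil_of_length_eq_zero hzero
    simp [equalSubstring, equalSubstring_alt, h0]
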